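-- pv_equiv track=rewrite | github.com/irsa-ashraf/advent_of_code | day2/day2.py | calculate_depth_and_horizontal
-- ===== SOURCE A (Python) =====
-- def calculate_depth_and_horizontal(direction_data):
--     '''
--     Calculates the final depth and horizontal position
--     Inputs:
--         direction_data: (list) list of tuples
--     Returns (tuple): tuple with final horizontal and depth values
--     '''
--
--     horizontal = 0
--     depth = 0
--
--     for direction, value in direction_data:
--         if direction == 'forward':
--             horizontal += int(value)
--         elif direction == "down":
--             depth += int(value)
--         elif direction == "up":
--             depth -= int(value)
--
--     return (horizontal, depth)
-- ===== SOURCE B (Python) =====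
-- def calculate_depth_and_horizontal(direction_data):
--     horizontal = sum(int(v) for d, v in direction_data if d == 'forward')
--     depth = (sum(int(v) for d, v in direction_data if d == 'down')
--              - sum(int(v) for d, v in direction_data if d == 'up'))
--     return (horizontal, depth)
-- ===== Notes on version B (the rewrite author's own statement) =====
-- stated objective: idiomatic
-- what changed: Replaces the single branching accumulator loop with three independent filtered sums (forward, down, up) combined arithmetically.
import Mathlib
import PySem

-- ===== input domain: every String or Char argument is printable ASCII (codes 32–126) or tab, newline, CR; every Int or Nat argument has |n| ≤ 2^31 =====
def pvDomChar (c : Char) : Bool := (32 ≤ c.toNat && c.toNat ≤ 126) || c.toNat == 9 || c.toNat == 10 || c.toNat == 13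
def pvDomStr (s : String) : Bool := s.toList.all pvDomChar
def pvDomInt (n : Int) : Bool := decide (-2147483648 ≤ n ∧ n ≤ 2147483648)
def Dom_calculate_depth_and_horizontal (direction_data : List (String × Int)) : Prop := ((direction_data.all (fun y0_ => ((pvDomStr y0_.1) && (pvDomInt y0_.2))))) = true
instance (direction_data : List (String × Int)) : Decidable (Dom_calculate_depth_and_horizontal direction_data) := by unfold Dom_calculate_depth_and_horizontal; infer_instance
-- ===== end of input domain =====

-- B replaces A's single branching accumulator loop with three independent filtered sums (idiomatic decomposition; same cost).

-- ===== PORT A =====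
-- A: one pass, updating (horizontal, depth) per branch; int(value) is identity on Int.
def calculate_depth_and_horizontal (direction_data : List (String × Int)) : Int × Int :=
  let st := direction_data.foldl
    (fun (st : Int × Int) dv =>
      if dv.1 == "forward" then (st.1 + dv.2, st.2)
      else if dv.1 == "down" then (st.1, st.2 + dv.2)
      else if dv.1 == "up" then (st.1, st.2 - dv.2)
      else st)
    (0, 0)
  (st.1, st.2)

-- ===== PORT B =====
def calculate_depth_and_horizontal_alt (direction_data : List (String × Int)) : Int × Int :=
  let horizontal := ((direction_data.filter (fun dv => dv.1 == "forward")).map (fun dv => dv.2)).sum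
  let depth := ((direction_data.filter (fun dv => dv.1 == "down")).map (fun dv => dv.2)).sum
             - ((direction_data.filter (fun dv => dv.1 == "up")).map (fun dv => dv.2)).sum
  (horizontal, depth)

-- ===== PRECONDITION & SPEC =====
def Spec_calculate_depth_and_horizontal (direction_data : List (String × Int)) (out : Int × Int) : Prop := out = calculate_depth_and_horizontal_alt direction_data
instance (direction_data : List (String × Int)) (out : Int × Int) : Decidable (Spec_calculate_depth_and_horizontal direction_data out) := by unfold Spec_calculate_depth_and_horizontal; infer_instance

-- ===== CLAIM (what is proved, stated in full; the proofs are below) =====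
def Claim_equal_calculate_depth_and_horizontal : Prop := ∀ (direction_data : List (String × Int)), Dom_calculate_depth_and_horizontal direction_data → Spec_calculate_depth_and_horizontal direction_data (calculate_depth_and_horizontal direction_data)

-- ===== LEMMAS AND PROOFS =====

lemma fold_eq_sums (l : List (String × Int)) (h d : Int) :
    l.foldl
      (fun (st : Int × Int) dv =>
        if dv.1 == "forward" then (st.1 + dv.2, st.2)
        else if dv.1 == "down" then (st.1, st.2 + dv.2)
        else if dv.1 == "up" then (st.1, st.2 - dv.2)
        else st)
      (h, d)
    = (h + ((l.filter (fun dv => dv.1 == "forward")).map (fun dv => dv.2)).sum,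
       d + ((l.filter (fun dv => dv.1 == "down")).map (fun dv => dv.2)).sum
         - ((l.filter (fun dv => dv.1 == "up")).map (fun dv => dv.2)).sum) := by
  induction l generalizing h d with
  | nil => simp
  | cons x xs ih =>
    rw [List.foldl_cons, List.filter_cons, List.filter_cons, List.filter_cons]
    by_cases hf : x.1 == "forward"
    · have hf' : x.1 = "forward" := by simpa using hf
      have h1 : (x.1 == "down") = false := by simp [hf']
      have h2 : (x.1 == "up") = false := by simp [hf']
      rw [hf, h1, h2]
      simp only [if_true, if_false, Bool.false_eq_true, List.map_cons, List.sum_cons]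
      rw [ih]
      refine Prod.ext ?_ ?_ <;> simp <;> ring
    · have hf0 : (x.1 == "forward") = false := by simpa using hf
      by_cases hd : x.1 == "down"
      · have hd' : x.1 = "down" := by simpa using hd
        have h2 : (x.1 == "up") = false := by simp [hd']
        rw [hf0, hd, h2]
        simp only [Bool.false_eq_true, ite_true, ite_false, List.map_cons, List.sum_cons]
        rw [ih]
        refine Prod.ext ?_ ?_ <;> simp <;> ring
      · have hd0 : (x.1 == "down") = false := by simpa using hd
        by_cases hu : x.1 == "up"
        · rw [hf0, hd0, hu]
          simp only [Bool.false_eq_true, ite_true, ite_false, List.map_cons, List.sum_cons]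
          rw [ih]
          refine Prod.ext ?_ ?_ <;> simp <;> ring
        · have hu0 : (x.1 == "up") = false := by simpa using hu
          rw [hf0, hd0, hu0]
          simp only [Bool.false_eq_true, ite_false]
          exact ih h d

-- ===== VERDICT (by name: the statement is the Claim_ definition above) =====
theorem calculate_depth_and_horizontal_spec : Claim_equal_calculate_depth_and_horizontal := by
  intro l _
  show _ = _
  unfold calculate_depth_and_horizontal calculate_depth_and_horizontal_alt
  rw [fold_eq_sums]
  simp
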